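-- pv_equiv track=rewrite | github.com/QuangPhung15/CompetitiveProgramming | codeforce/Python/800/Vanya and Fence.py | solve
-- ===== SOURCE A (Python) =====
-- def solve(n, h, a):
-- 	res = 0
--
-- 	for p in a:
-- 		if (p > h):
-- 			res += 2
-- 		else:
-- 			res += 1
--
-- 	return res
-- ===== SOURCE B (Python) =====
-- def solve(n, h, a):
--     # Sort the planks, then binary-search for the first plank strictly taller
--     # than the fence: lo ends as the number of planks of height <= h, so the
--     # answer is lo * 1 + (len - lo) * 2 = 2 * len - lo.
--     b = sorted(a)
--     lo, hi = 0, len(b)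
--     while lo < hi:
--         mid = (lo + hi) // 2
--         if b[mid] > h:
--             hi = mid
--         else:
--             lo = mid + 1
--     return 2 * len(b) - lo
-- ===== Notes on version B (the rewrite author's own statement) =====
-- stated objective: alternative
-- what changed: Instead of A's single linear pass adding 1 or 2 per plank, B sorts the planks and binary-searches for the boundary between planks <= h and planks > h, returning 2*len(a) minus that boundary index.
import Mathlib
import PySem

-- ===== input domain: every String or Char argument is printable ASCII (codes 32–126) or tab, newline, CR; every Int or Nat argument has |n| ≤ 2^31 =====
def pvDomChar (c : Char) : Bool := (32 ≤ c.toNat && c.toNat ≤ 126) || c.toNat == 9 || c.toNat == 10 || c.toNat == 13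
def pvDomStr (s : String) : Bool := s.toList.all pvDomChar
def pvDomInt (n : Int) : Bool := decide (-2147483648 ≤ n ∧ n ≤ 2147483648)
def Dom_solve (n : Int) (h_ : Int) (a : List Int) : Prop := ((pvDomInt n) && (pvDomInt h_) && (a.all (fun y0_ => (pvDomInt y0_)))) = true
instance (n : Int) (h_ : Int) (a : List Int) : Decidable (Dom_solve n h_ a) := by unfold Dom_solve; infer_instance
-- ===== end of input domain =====

-- B replaces A's linear 1-or-2 accumulator pass by sort + binary search for the <=h / >h boundary (an alternative algorithm, not claimed faster).

-- ===== PORT A =====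
def solve (n : Int) (h_ : Int) (a : List Int) : Int :=
  a.foldl (fun res p => if p > h_ then res + 2 else res + 1) 0

-- ===== PORT B =====
-- the while loop of Source B; lo, hi stay in [0, len b] so b[mid] is always in
-- range and List.getD with default 0 is exact here
def bsLoop (b : List Int) (h_ : Int) (lo hi : Nat) : Nat :=
  if lo < hi then
    let mid := (lo + hi) / 2
    if b.getD mid 0 > h_ then bsLoop b h_ lo mid
    else bsLoop b h_ (mid + 1) hi
  else lo
termination_by hi - lo
decreasing_by all_goals omega

def solve_alt (n : Int) (h_ : Int) (a : List Int) : Int :=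
  let b := PySem.List.sorted a (fun x => x) false
  2 * (b.length : Int) - (bsLoop b h_ 0 b.length : Int)

-- ===== PRECONDITION & SPEC =====
def Spec_solve (n : Int) (h_ : Int) (a : List Int) (out : Int) : Prop := out = solve_alt n h_ a
instance (n : Int) (h_ : Int) (a : List Int) (out : Int) : Decidable (Spec_solve n h_ a out) := by unfold Spec_solve; infer_instance

-- ===== CLAIM (what is proved, stated in full; the proofs are below) =====
def Claim_equal_solve : Prop := ∀ (n : Int) (h_ : Int) (a : List Int), Dom_solve n h_ a → Spec_solve n h_ a (solve n h_ a)

-- ===== LEMMAS AND PROOFS =====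

-- A's loop: base 1 per element plus 1 per element strictly above h_
theorem solve_foldl_acc (h_ : Int) (a : List Int) (acc : Int) :
    a.foldl (fun res p => if p > h_ then res + 2 else res + 1) acc
      = acc + (a.length : Int) + (a.countP (fun p => decide (h_ < p)) : Int) := by
  induction a generalizing acc with
  | nil => simp
  | cons x xs ih =>
    simp only [List.foldl_cons, List.countP_cons, List.length_cons, ih]
    by_cases hx : h_ < x <;> simp [hx] <;> ring

-- the binary search returns a boundary: everything left of it is ≤ h_,
-- everything from it on is > h_ (needs the sortedness invariant)
theorem bsLoop_spec (b : List Int) (h_ : Int)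
    (hsort : b.Pairwise (fun x y => x ≤ y)) :
    ∀ lo hi : Nat, lo ≤ hi → hi ≤ b.length →
    (∀ i, i < lo → b.getD i 0 ≤ h_) →
    (∀ i, hi ≤ i → i < b.length → h_ < b.getD i 0) →
    bsLoop b h_ lo hi ≤ b.length ∧
    (∀ i, i < bsLoop b h_ lo hi → b.getD i 0 ≤ h_) ∧
    (∀ i, bsLoop b h_ lo hi ≤ i → i < b.length → h_ < b.getD i 0) := by
  intro lo hi
  induction lo, hi using bsLoop.induct b h_ with
  | case1 lo hi hlt mid hmid ih =>
    intro _ hhi hlo hhi'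
    have hmid2 : b.getD ((lo + hi) / 2) 0 > h_ := hmid
    rw [bsLoop, if_pos hlt, if_pos hmid2]
    have hmlt : (lo + hi) / 2 < hi := by omega
    refine ih (by omega) (by omega) hlo ?_
    intro i hle hi'
    -- from sortedness: b[mid] > h_ propagates right
    have hm : (lo + hi) / 2 < b.length := by omega
    rcases Nat.eq_or_lt_of_le hle with heq | hlt'
    · subst heq; exact hmid
    · have : b.getD ((lo + hi) / 2) 0 ≤ b.getD i 0 := by
        have := List.pairwise_iff_getElem.mp hsort ((lo + hi) / 2) i hm hi' hlt'
        simpa [List.getD_eq_getElem?_getD, List.getElem?_eq_getElem, hm, hi'] using this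
      omega
  | case2 lo hi hlt mid hmid ih =>
    intro _ hhi hlo hhi'
    have hmid2 : ¬ b.getD ((lo + hi) / 2) 0 > h_ := hmid
    rw [bsLoop, if_pos hlt, if_neg hmid2]
    have hm : (lo + hi) / 2 < b.length := by omega
    refine ih (by omega) (by omega) ?_ hhi'
    intro i hi'
    rcases Nat.lt_or_ge i ((lo + hi) / 2) with hlt' | hge
    · rcases Nat.lt_or_ge i lo with h1 | h1
      · exact hlo i h1
      · have : b.getD i 0 ≤ b.getD ((lo + hi) / 2) 0 := by
          have hilen : i < b.length := by omega
          have := List.pairwise_iff_getElem.mp hsort i ((lo + hi) / 2) hilen hm hlt'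
          simpa [List.getD_eq_getElem?_getD, List.getElem?_eq_getElem, hm, hilen] using this
        omega
    · have : i = (lo + hi) / 2 := by omega
      subst this; omega
  | case3 lo hi hnlt =>
    intro hle hhi hlo hhi'
    rw [bsLoop, if_neg hnlt]
    exact ⟨by omega, hlo, fun i h1 h2 => hhi' i (by omega) h2⟩

-- a boundary index determines the count of elements ≤ h_
theorem countP_of_boundary (h_ : Int) :
    ∀ (b : List Int) (r : Nat), r ≤ b.length →
    (∀ i, i < r → b.getD i 0 ≤ h_) →
    (∀ i, r ≤ i → i < b.length → h_ < b.getD i 0) →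
    b.countP (fun p => decide (p ≤ h_)) = r := by
  intro b
  induction b with
  | nil => intro r hr _ _; simp at hr ⊢; omega
  | cons x xs ih =>
    intro r hr hlo hhi
    cases r with
    | zero =>
      have hx : h_ < x := by simpa using hhi 0 (by omega) (by simp)
      have : xs.countP (fun p => decide (p ≤ h_)) = 0 := by
        apply ih 0 (by omega) (by omega)
        intro i _ hilen
        simpa using hhi (i + 1) (by omega) (by simpa using Nat.succ_lt_succ hilen)
      simp [List.countP_cons, this, not_le.mpr hx]
    | succ r' =>
      have hx : x ≤ h_ := by simpa using hlo 0 (by omega)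
      have : xs.countP (fun p => decide (p ≤ h_)) = r' := by
        apply ih r' (by simpa using hr)
        · intro i hi
          simpa using hlo (i + 1) (by omega)
        · intro i hi hilen
          simpa using hhi (i + 1) (by omega) (by simpa using Nat.succ_lt_succ hilen)
      simp [List.countP_cons, this, hx]

-- counts of the two complementary predicates add up to the length
theorem countP_le_add_gt (h_ : Int) (b : List Int) :
    b.countP (fun p => decide (p ≤ h_)) + b.countP (fun p => decide (h_ < p)) = b.length := by
  induction b with
  | nil => simp
  | cons x xs ih =>
    by_cases hx : x ≤ h_ <;>
      simp [hx, not_le.mp] <;> omega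

-- ===== VERDICT (by name: the statement is the Claim_ definition above) =====
theorem solve_spec : Claim_equal_solve := by
  intro n h_ a _
  unfold Spec_solve solve
  set b := PySem.List.sorted a (fun x => x) false with hb
  have halt : solve_alt n h_ a = 2 * (b.length : Int) - (bsLoop b h_ 0 b.length : Int) := rfl
  have hperm : b.Perm a := PySem.List.sorted_perm a (fun x => x) false
  have hsort : b.Pairwise (fun x y => x ≤ y) := by
    simpa using PySem.List.sorted_pairwise a (fun x => x)
  obtain ⟨hr1, hr2, hr3⟩ :=
    bsLoop_spec b h_ hsort 0 b.length (by omega) (le_refl _)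
      (by omega) (by omega)
  have hcount : b.countP (fun p => decide (p ≤ h_)) = bsLoop b h_ 0 b.length :=
    countP_of_boundary h_ b _ hr1 hr2 hr3
  have hsum := countP_le_add_gt h_ b
  have hlen : b.length = a.length := hperm.length_eq
  have hgt : b.countP (fun p => decide (h_ < p)) = a.countP (fun p => decide (h_ < p)) :=
    hperm.countP_eq _
  rw [solve_foldl_acc, halt]
  omega
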